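-- pv_equiv track=rewrite | github.com/uuyeong/hateslop_hackathon | utils/word_generator.py | select_recommended_items
-- ===== SOURCE A (Python) =====
-- def select_recommended_items(breakdown: list, category: str):
--     if not breakdown:
--         return []
--     if category in ("Academic / STEM", "Career / Tech Skills"):
--         primary = [item for item in breakdown if item.get("type") == "books"]
--         secondary = [item for item in breakdown if item.get("type") != "books"]
--     else:
--         primary = [item for item in breakdown if item.get("type") != "books"]
--         secondary = [item for item in breakdown if item.get("type") == "books"]
--     return (primary + secondary)[:3]
-- ===== SOURCE B (Python) =====
-- def select_recommended_items(breakdown: list, category: str):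
--     books_first = category in ("Academic / STEM", "Career / Tech Skills")
--
--     def key(item):
--         return 0 if (item.get("type") == "books") == books_first else 1
--
--     return sorted(breakdown, key=key)[:3]
-- ===== Notes on version B (the rewrite author's own statement) =====
-- stated objective: simpler
-- what changed: Replaced the two partitioning list comprehensions plus concatenation with a single stable key-sort (key 0 for the preferred type, 1 otherwise) followed by [:3], relying on sort stability for the original relative order.
import Mathlib
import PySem

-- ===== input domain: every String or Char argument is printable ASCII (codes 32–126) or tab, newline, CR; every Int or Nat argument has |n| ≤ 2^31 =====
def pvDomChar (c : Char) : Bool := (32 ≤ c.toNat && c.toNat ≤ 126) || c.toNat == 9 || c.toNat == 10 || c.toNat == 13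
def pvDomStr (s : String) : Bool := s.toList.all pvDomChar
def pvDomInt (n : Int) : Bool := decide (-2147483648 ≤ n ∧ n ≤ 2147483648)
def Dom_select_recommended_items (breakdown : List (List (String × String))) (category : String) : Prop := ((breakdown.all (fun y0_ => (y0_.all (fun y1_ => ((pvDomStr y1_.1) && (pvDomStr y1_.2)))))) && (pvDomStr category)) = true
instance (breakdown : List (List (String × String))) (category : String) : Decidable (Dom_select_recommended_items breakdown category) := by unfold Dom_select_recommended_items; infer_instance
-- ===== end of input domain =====

-- B replaces A's two partitioning comprehensions with one stable key-sort (0 = preferred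
-- type, 1 = other) followed by [:3]; objective: simpler (no speed claim).

-- ===== PORT A =====
-- item.get("type") on a dict (association list, first match) is List.lookup;
-- != "books" is the boolean negation of == "books" since None == "books" is False.
def select_recommended_items (breakdown : List (List (String × String))) (category : String) : List (List (String × String)) :=
  if breakdown = [] then []
  else if category = "Academic / STEM" ∨ category = "Career / Tech Skills" then
    let primary := breakdown.filter (fun item => item.lookup "type" == some "books")
    let secondary := breakdown.filter (fun item => !(item.lookup "type" == some "books"))
    PySem.List.slice (primary ++ secondary) none (some 3)
  else
    let primary := breakdown.filter (fun item => !(item.lookup "type" == some "books"))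
    let secondary := breakdown.filter (fun item => item.lookup "type" == some "books")
    PySem.List.slice (primary ++ secondary) none (some 3)

-- ===== PORT B =====
def select_recommended_items_alt (breakdown : List (List (String × String))) (category : String) : List (List (String × String)) :=
  let booksFirst : Bool := category == "Academic / STEM" || category == "Career / Tech Skills"
  let key : List (String × String) → Int := fun item =>
    if (item.lookup "type" == some "books") == booksFirst then 0 else 1
  PySem.List.slice (PySem.List.sorted breakdown key false) none (some 3)

-- ===== PRECONDITION & SPEC =====
def Spec_select_recommended_items (breakdown : List (List (String × String))) (category : String) (out : List (List (String × String))) : Prop := out = select_recommended_items_alt breakdown category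
instance (breakdown : List (List (String × String))) (category : String) (out : List (List (String × String))) : Decidable (Spec_select_recommended_items breakdown category out) := by unfold Spec_select_recommended_items; infer_instance

-- ===== CLAIM (what is proved, stated in full; the proofs are below) =====
def Claim_equal_select_recommended_items : Prop := ∀ (breakdown : List (List (String × String))) (category : String), Dom_select_recommended_items breakdown category → Spec_select_recommended_items breakdown category (select_recommended_items breakdown category)

-- ===== LEMMAS AND PROOFS =====

-- Inserting a key-0 element into (all-key-0 ++ all-key-1) puts it between the blocks.
theorem pv_insert_mid {α : Type} (p : α → Bool) (x : α) (f0 f1 : List α)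
    (h0 : ∀ y ∈ f0, p y = true) (h1 : ∀ y ∈ f1, p y = false) (hx : p x = true) :
    PySem.List.insertBy
      (fun a b => decide ((if p a then (0 : Int) else 1) < (if p b then (0 : Int) else 1)))
      x (f0 ++ f1) = f0 ++ x :: f1 := by
  induction f0 with
  | nil =>
    cases f1 with
    | nil => simp [PySem.List.insertBy]
    | cons y ys =>
      have hy : p y = false := h1 y (by simp)
      simp [PySem.List.insertBy, hx, hy]
  | cons z f0' ih =>
    have hz : p z = true := h0 z (by simp)
    simp only [List.cons_append, PySem.List.insertBy, hx, hz]
    simp only [decide_eq_true_eq]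
    rw [if_neg (by norm_num)]
    rw [ih (fun y hy => h0 y (by simp [hy]))]

-- Inserting a key-1 element appends it at the end.
theorem pv_insert_end {α : Type} (p : α → Bool) (x : α) (ys : List α) (hx : p x = false) :
    PySem.List.insertBy
      (fun a b => decide ((if p a then (0 : Int) else 1) < (if p b then (0 : Int) else 1)))
      x ys = ys ++ [x] := by
  apply PySem.List.insertBy_of_forall_not_before
  intro y _
  cases hy : p y
  · simp [hx]
  · simp [hx, hy]

-- Invariant of the insertion-sort fold with a two-valued key.
theorem pv_sort_two_aux {α : Type} (p : α → Bool) :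
    ∀ (xs f0 f1 : List α), (∀ y ∈ f0, p y = true) → (∀ y ∈ f1, p y = false) →
    xs.foldl (fun acc x =>
        PySem.List.insertBy
          (fun a b => decide ((if p a then (0 : Int) else 1) < (if p b then (0 : Int) else 1)))
          x acc) (f0 ++ f1)
      = (f0 ++ xs.filter p) ++ (f1 ++ xs.filter (fun x => !p x)) := by
  intro xs
  induction xs with
  | nil => intro f0 f1 _ _; simp
  | cons x xs ih =>
    intro f0 f1 h0 h1
    simp only [List.foldl_cons]
    cases hx : p x with
    | true =>
      rw [pv_insert_mid p x f0 f1 h0 h1 hx]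
      have : f0 ++ x :: f1 = (f0 ++ [x]) ++ f1 := by simp
      rw [this, ih (f0 ++ [x]) f1
        (by intro y hy; rcases List.mem_append.mp hy with h | h
            · exact h0 y h
            · simp at h; subst h; exact hx) h1]
      simp [hx]
    | false =>
      rw [show f0 ++ f1 = (f0 ++ f1 : List α) from rfl,
          pv_insert_end p x (f0 ++ f1) hx]
      have : (f0 ++ f1) ++ [x] = f0 ++ (f1 ++ [x]) := by simp
      rw [this, ih f0 (f1 ++ [x]) h0
        (by intro y hy; rcases List.mem_append.mp hy with h | h
            · exact h1 y h
            · simp at h; subst h; exact hx)]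
      simp [hx]

-- The stable sort with key (0 if p else 1) is exactly filter p ++ filter !p.
theorem pv_sorted_partition {α : Type} (p : α → Bool) (xs : List α) :
    PySem.List.sorted xs (fun x => if p x then (0 : Int) else 1) false
      = xs.filter p ++ xs.filter (fun x => !p x) := by
  rw [PySem.List.sorted_eq_foldl_insertBy]
  have := pv_sort_two_aux p xs [] [] (by simp) (by simp)
  simpa using this

-- ===== VERDICT (by name: the statement is the Claim_ definition above) =====
theorem select_recommended_items_spec : Claim_equal_select_recommended_items := by
  intro breakdown category _
  unfold Spec_select_recommended_items select_recommended_items select_recommended_items_alt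
  by_cases hb : breakdown = []
  · subst hb
    simp [PySem.List.sorted_eq_foldl_insertBy, PySem.List.slice]
  · rw [if_neg hb]
    by_cases hc : category = "Academic / STEM" ∨ category = "Career / Tech Skills"
    · have hbf : (category == "Academic / STEM" || category == "Career / Tech Skills") = true := by
        rcases hc with h | h <;> simp [h]
      rw [if_pos hc]
      simp only [hbf]
      rw [show (fun item : List (String × String) =>
            if (item.lookup "type" == some "books") == true then (0 : Int) else 1)
          = (fun item : List (String × String) =>
            if (item.lookup "type" == some "books") then (0 : Int) else 1) by
          funext item; simp]
      rw [pv_sorted_partition (fun item : List (String × String) =>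
            item.lookup "type" == some "books") breakdown]
    · have hbf : (category == "Academic / STEM" || category == "Career / Tech Skills") = false := by
        rcases not_or.mp hc with ⟨h1, h2⟩
        simp [h1, h2]
      rw [if_neg hc]
      simp only [hbf]
      rw [show (fun item : List (String × String) =>
            if (item.lookup "type" == some "books") == false then (0 : Int) else 1)
          = (fun item : List (String × String) =>
            if !(item.lookup "type" == some "books") then (0 : Int) else 1) by
          funext item; simp]
      rw [pv_sorted_partition (fun item : List (String × String) =>
            !(item.lookup "type" == some "books")) breakdown]
      simp
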